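-- pv_equiv track=rewrite | github.com/maheshnayak88/blobtosnowflakefunctionapp | blobtosnowflake/__init__.py | cluster_by_database_and_table
-- ===== SOURCE A (Python) =====
-- from typing import Dict, List
--
-- def cluster_by_database_and_table(file_list: List[str]) -> Dict[str, Dict[str, str]]:
--     """
--     Clusters file paths by database and table, and returns the most recent file path for each grouping.
--
--     Args:
--         file_list (List[str]): A list of file paths in the format of 'database/table/partition/file'.
--
--     Returns:
--         Dict[str, Dict[str, str]]: A dictionary containing the most recent file path for each database and table grouping.
--     """
--     clusters = {}
--     for path in file_list:
--         parts = path.split("/")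
--         if len(parts) < 3:
--             continue
--         db = parts[0]
--         table = parts[1]
--         if db not in clusters:
--             clusters[db] = {}
--         if table not in clusters[db]:
--             clusters[db][table] = path
--         else:
--             existing_path = clusters[db][table]
--             existing_date = existing_path.split("/")[-1].split("_")[1]
--             new_date = path.split("/")[-1].split("_")[1]
--             if new_date > existing_date:
--                 clusters[db][table] = path
--
--     # Add the "blob://" prefix to the file paths and return the dictionary
--     for db in clusters:
--         for table in clusters[db]:
--             clusters[db][table] = "blob://" + clusters[db][table]
--
--     return clusters
-- ===== SOURCE B (Python) =====
-- from typing import Dict, List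
--
--
-- def cluster_by_database_and_table(file_list: List[str]) -> Dict[str, Dict[str, str]]:
--     # Pass 1: bucket every qualifying path by database then table, in encounter order.
--     buckets = {}
--     for path in file_list:
--         parts = path.split("/")
--         if len(parts) < 3:
--             continue
--         buckets.setdefault(parts[0], {}).setdefault(parts[1], []).append(path)
--     # Pass 2: pick the winner of each group (first maximal by date part of the filename).
--     return {
--         db: {
--             table: "blob://" + (group[0] if len(group) == 1
--                                 else max(group, key=lambda p: p.split("/")[-1].split("_")[1]))
--             for table, group in tables.items()
--         }
--         for db, tables in buckets.items()
--     }
-- ===== Notes on version B (the rewrite author's own statement) =====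
-- stated objective: alternative
-- what changed: A keeps a running best path per (db, table) inside a single pass; B first buckets every qualifying path into a dict-of-dict-of-lists and then, in a second pass, picks each group's winner with max(group, key=date) (group[0] for singletons, where A never computes a date).
import Mathlib
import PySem

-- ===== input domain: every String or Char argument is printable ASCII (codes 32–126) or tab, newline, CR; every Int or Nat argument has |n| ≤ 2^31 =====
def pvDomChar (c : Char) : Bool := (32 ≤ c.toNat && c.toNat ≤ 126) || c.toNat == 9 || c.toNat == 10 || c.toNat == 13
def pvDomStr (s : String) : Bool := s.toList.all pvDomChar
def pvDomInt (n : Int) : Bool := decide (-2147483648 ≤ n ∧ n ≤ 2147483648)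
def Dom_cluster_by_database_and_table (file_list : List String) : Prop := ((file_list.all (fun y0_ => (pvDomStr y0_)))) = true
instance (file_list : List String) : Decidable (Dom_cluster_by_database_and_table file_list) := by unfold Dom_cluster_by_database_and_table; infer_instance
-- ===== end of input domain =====

-- B replaces A's single pass of running-best nested-dict updates by bucketing the paths
-- per (db, table) first and then picking each group's winner with max(…, key=date); objective: alternative decomposition.

-- s.split(sep) for the non-empty separators "/" and "_" used below (split? is none only for sep = "")
def pvSplit (s sep : String) : List String := (PySem.Str.split? s sep).getD []

-- shared key extractor: path.split("/")[-1].split("_")[1]  (Python raises where the filename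
-- has no "_"; the ports use getD "" there and those inputs are excluded by Pre_)
def pvLastSeg (p : String) : String := (PySem.List.pyGet? (pvSplit p "/") (-1)).getD ""

def pvDateKey (p : String) : String := (PySem.List.pyGet? (pvSplit (pvLastSeg p) "_") 1).getD ""

-- ===== PORT A =====
def pvStepA (c : PySem.Dict String (PySem.Dict String String)) (path : String) :
    PySem.Dict String (PySem.Dict String String) :=
  let parts := pvSplit path "/"
  if parts.length < 3 then c
  else
    let db := (PySem.List.pyGet? parts 0).getD ""
    let table := (PySem.List.pyGet? parts 1).getD ""
    let c1 := if c.contains db then c else c.insert db PySem.Dict.empty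
    let inner := c1.getD db PySem.Dict.empty
    if inner.contains table = false then c1.insert db (inner.insert table path)
    else
      let existing := inner.getD table ""
      if pvDateKey existing < pvDateKey path then c1.insert db (inner.insert table path)
      else c1

def cluster_by_database_and_table (file_list : List String) : List (String × List (String × String)) :=
  let clusters := file_list.foldl pvStepA PySem.Dict.empty
  -- final loop: clusters[db][table] = "blob://" + clusters[db][table], returned as nested assoc lists
  clusters.items.map (fun kv => (kv.1, kv.2.items.map (fun tv => (tv.1, "blob://" ++ tv.2))))

-- ===== PORT B =====
def pvStepB (b : PySem.Dict String (PySem.Dict String (List String))) (path : String) :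
    PySem.Dict String (PySem.Dict String (List String)) :=
  let parts := pvSplit path "/"
  if parts.length < 3 then b
  else
    b.modify ((PySem.List.pyGet? parts 0).getD "") PySem.Dict.empty
      (fun inner => inner.modify ((PySem.List.pyGet? parts 1).getD "") [] (fun gs => gs ++ [path]))

def pvWinner (gs : List String) : String :=
  if gs.length == 1 then gs.headD "" else (PySem.List.max? gs pvDateKey).getD ""

def cluster_by_database_and_table_alt (file_list : List String) : List (String × List (String × String)) :=
  let buckets := file_list.foldl pvStepB PySem.Dict.empty
  buckets.items.map (fun kv => (kv.1, kv.2.items.map (fun tv => (tv.1, "blob://" ++ pvWinner tv.2))))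

-- ===== PRECONDITION & SPEC =====
def pvKept (l : List String) : List String := l.filter (fun p => 3 ≤ (pvSplit p "/").length)

-- Pre_ excludes exactly the inputs on which the Python A raises IndexError: some (db, table)
-- group of size ≥ 2 contains a path whose filename has no "_" (B raises there too).
def Pre_cluster_by_database_and_table (file_list : List String) : Prop :=
  ∀ p ∈ pvKept file_list,
    2 ≤ (pvKept file_list).countP
        (fun q => (PySem.List.pyGet? (pvSplit q "/") 0 == PySem.List.pyGet? (pvSplit p "/") 0) &&
                  (PySem.List.pyGet? (pvSplit q "/") 1 == PySem.List.pyGet? (pvSplit p "/") 1)) →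
    2 ≤ (pvSplit (pvLastSeg p) "_").length

instance (file_list : List String) : Decidable (Pre_cluster_by_database_and_table file_list) := by
  unfold Pre_cluster_by_database_and_table; infer_instance

def pvWitness_cluster_by_database_and_table : List String := ["db/t/f_20", "db/t/f_21", "db/u/x"]

def Spec_cluster_by_database_and_table (file_list : List String) (out : List (String × List (String × String))) : Prop := out = cluster_by_database_and_table_alt file_list
instance (file_list : List String) (out : List (String × List (String × String))) : Decidable (Spec_cluster_by_database_and_table file_list out) := by unfold Spec_cluster_by_database_and_table; infer_instance

-- ===== CLAIM (what is proved, stated in full; the proofs are below) =====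
def Claim_equal_cluster_by_database_and_table : Prop := ∀ (file_list : List String), Dom_cluster_by_database_and_table file_list → Pre_cluster_by_database_and_table file_list → Spec_cluster_by_database_and_table file_list (cluster_by_database_and_table file_list)

-- ===== LEMMAS AND PROOFS =====

-- the running best of A over a bucket (first maximal element under pvDateKey)
def pvRed (gs : List String) : String :=
  match gs with
  | [] => ""
  | h :: t => t.foldl (fun b p => if pvDateKey b < pvDateKey p then p else b) h

-- map over the values of a Dict (keys and positions unchanged)
def pvDmap {ν ν' : Type} (f : ν → ν') (d : PySem.Dict String ν) : PySem.Dict String ν' :=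
  PySem.Dict.mk (d.items.map (fun kv => (kv.1, f kv.2)))

lemma pvDmap_contains {ν ν' : Type} (f : ν → ν') (d : PySem.Dict String ν) (k : String) :
    (pvDmap f d).contains k = d.contains k := by
  simp [pvDmap, PySem.Dict.contains, List.any_map, Function.comp_def]

lemma pvDmap_get? {ν ν' : Type} (f : ν → ν') (d : PySem.Dict String ν) (k : String) :
    (pvDmap f d).get? k = (d.get? k).map f := by
  obtain ⟨l⟩ := d
  induction l with
  | nil => rfl
  | cons p t ih =>
      simp only [pvDmap, PySem.Dict.get?, List.map_cons, List.find?_cons]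
      by_cases h : p.1 == k
      · simp [h]
      · simpa [h, pvDmap, PySem.Dict.get?] using ih

lemma pvDmap_insert {ν ν' : Type} (f : ν → ν') (d : PySem.Dict String ν) (k : String) (v : ν) :
    pvDmap f (d.insert k v) = (pvDmap f d).insert k (f v) := by
  unfold PySem.Dict.insert
  rw [pvDmap_contains]
  by_cases hc : d.contains k
  · simp only [hc, if_pos]
    unfold pvDmap
    simp only [List.map_map]
    congr 1
    apply List.map_congr_left
    intro p _
    by_cases h : p.1 == k <;> simp [h, Function.comp]
  · simp [hc, pvDmap]

lemma pvDmap_keys {ν ν' : Type} (f : ν → ν') (d : PySem.Dict String ν) :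
    (pvDmap f d).keys = d.keys := by
  simp [pvDmap, PySem.Dict.keys, List.map_map, Function.comp]

lemma pvMem_eq_of_nodup {ν : Type} {l : List (String × ν)} (hnd : (l.map Prod.fst).Nodup)
    {k : String} {v : ν} {p : String × ν} (hv : (k, v) ∈ l) (hp : p ∈ l) (hk : p.1 = k) :
    p = (k, v) := by
  induction l with
  | nil => cases hv
  | cons q t ih =>
      simp only [List.map_cons, List.nodup_cons] at hnd
      rcases List.mem_cons.mp hp with hp1 | hp1 <;> rcases List.mem_cons.mp hv with hv1 | hv1
      · exact hp1.trans hv1.symm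
      · exfalso
        apply hnd.1
        have hmem : (k : String) ∈ t.map Prod.fst := by
          simpa using List.mem_map_of_mem (f := Prod.fst) hv1
        rw [← hp1, hk]
        exact hmem
      · exfalso
        apply hnd.1
        have hmem : (p.1 : String) ∈ t.map Prod.fst :=
          List.mem_map_of_mem (f := Prod.fst) hp1
        rw [← hv1]
        simpa [← hk] using hmem
      · exact ih hnd.2 hv1 hp1

lemma pvInsert_noop {ν : Type} (d : PySem.Dict String ν) (k : String) (v : ν)
    (hnd : d.keys.Nodup) (h : d.get? k = some v) : d.insert k v = d := by
  have hm : (k, v) ∈ d.items := PySem.Dict.mem_items_of_get?_eq_some _ h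
  have hc : d.contains k = true := by
    rw [PySem.Dict.contains_eq_isSome_get? _ _, h]; rfl
  apply PySem.Dict.ext
  unfold PySem.Dict.insert
  simp only [hc, if_pos]
  conv_rhs => rw [← List.map_id d.items]
  apply List.map_congr_left
  intro p hp
  by_cases hb : p.1 == k
  · have := pvMem_eq_of_nodup hnd hm hp (by exact eq_of_beq hb)
    simp [this]
  · simp [hb]

-- invariant carried along B's bucketing pass
def pvGood (b : PySem.Dict String (PySem.Dict String (List String))) : Prop :=
  b.keys.Nodup ∧ ∀ kv ∈ b.items, kv.2.keys.Nodup ∧ ∀ tv ∈ kv.2.items, tv.2 ≠ []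

lemma pvRed_append (h : String) (t : List String) (p : String) :
    pvRed ((h :: t) ++ [p]) =
      if pvDateKey (pvRed (h :: t)) < pvDateKey p then p else pvRed (h :: t) := by
  simp [pvRed, List.foldl_append]

lemma pvGood_getD (b : PySem.Dict String (PySem.Dict String (List String))) (db : String)
    (hg : pvGood b) :
    (b.getD db PySem.Dict.empty).keys.Nodup ∧
      ∀ tv ∈ (b.getD db PySem.Dict.empty).items, tv.2 ≠ [] := by
  rcases hget : b.get? db with _ | ib
  · rw [PySem.Dict.getD_of_get?_eq_none _ _ hget]
    exact ⟨List.nodup_nil, by intro tv htv; cases htv⟩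
  · rw [PySem.Dict.getD_of_get?_eq_some _ _ hget]
    have hmem := PySem.Dict.mem_items_of_get?_eq_some _ hget
    exact ⟨(hg.2 _ hmem).1, (hg.2 _ hmem).2⟩

lemma pvStep_good (b : PySem.Dict String (PySem.Dict String (List String))) (path : String)
    (hg : pvGood b) : pvGood (pvStepB b path) := by
  unfold pvStepB
  by_cases hlen : (pvSplit path "/").length < 3
  · simpa [hlen] using hg
  · simp only [hlen, if_false]
    set db := (PySem.List.pyGet? (pvSplit path "/") 0).getD "" with hdb
    set table := (PySem.List.pyGet? (pvSplit path "/") 1).getD "" with htable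
    show pvGood (b.insert db ((b.getD db PySem.Dict.empty).modify table [] (fun gs => gs ++ [path])))
    obtain ⟨hnd, hins⟩ := pvGood_getD b db hg
    constructor
    · exact PySem.Dict.nodup_keys_insert _ _ _ hg.1
    · intro kv hkv
      rcases (PySem.Dict.mem_items_insert _ _ _ _).mp hkv with hkv1 | hkv1
      · subst hkv1
        refine ⟨PySem.Dict.nodup_keys_insert _ _ _ hnd, ?_⟩
        intro tv htv
        rcases (PySem.Dict.mem_items_insert _ _ _ _).mp htv with htv1 | htv1
        · subst htv1; simp
        · exact hins _ htv1.1
      · exact hg.2 _ hkv1.1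

lemma pvStep_comm (b : PySem.Dict String (PySem.Dict String (List String))) (path : String)
    (hg : pvGood b) :
    pvStepA (pvDmap (pvDmap pvRed) b) path = pvDmap (pvDmap pvRed) (pvStepB b path) := by
  unfold pvStepA pvStepB
  by_cases hlen : (pvSplit path "/").length < 3
  · simp [hlen]
  · simp only [hlen, if_false]
    set db := (PySem.List.pyGet? (pvSplit path "/") 0).getD "" with hdb
    set table := (PySem.List.pyGet? (pvSplit path "/") 1).getD "" with htable
    rw [pvDmap_contains]
    rw [show b.modify db PySem.Dict.empty (fun inner => inner.modify table [] (fun gs => gs ++ [path])) =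
        b.insert db ((b.getD db PySem.Dict.empty).modify table [] (fun gs => gs ++ [path])) from rfl]
    by_cases hc : b.contains db
    · -- db already present
      have hsome : (b.get? db).isSome := by rw [← PySem.Dict.contains_eq_isSome_get?]; exact hc
      obtain ⟨ib, hib⟩ := Option.isSome_iff_exists.mp hsome
      have hibm : (db, ib) ∈ b.items := PySem.Dict.mem_items_of_get?_eq_some _ hib
      have hgetc : (pvDmap (pvDmap pvRed) b).getD db PySem.Dict.empty = pvDmap pvRed ib := by
        rw [PySem.Dict.getD_eq_get?_getD, pvDmap_get?, hib]; rfl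
      have hgetb : b.getD db PySem.Dict.empty = ib := PySem.Dict.getD_of_get?_eq_some _ _ hib
      rw [if_pos hc, hgetc, hgetb]
      by_cases ht : ib.contains table
      · -- table present: compare dates
        have hsome2 : (ib.get? table).isSome := by rw [← PySem.Dict.contains_eq_isSome_get?]; exact ht
        obtain ⟨gs, hgs⟩ := Option.isSome_iff_exists.mp hsome2
        have hgsm : (table, gs) ∈ ib.items := PySem.Dict.mem_items_of_get?_eq_some _ hgs
        have hgsne : gs ≠ [] := (hg.2 _ hibm).2 _ hgsm
        have hex : (pvDmap pvRed ib).getD table "" = pvRed gs := by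
          rw [PySem.Dict.getD_eq_get?_getD, pvDmap_get?, hgs]; rfl
        have hmod : ib.modify table [] (fun gs => gs ++ [path]) = ib.insert table (gs ++ [path]) := by
          unfold PySem.Dict.modify
          rw [PySem.Dict.getD_of_get?_eq_some _ _ hgs]
        have hcond : ¬ ((pvDmap pvRed ib).contains table = false) := by
          rw [pvDmap_contains, ht]; simp
        rw [if_neg hcond, hex, hmod, pvDmap_insert, pvDmap_insert]
        obtain ⟨h0, t0, rfl⟩ : ∃ h0 t0, gs = h0 :: t0 := by
          cases gs with
          | nil => exact absurd rfl hgsne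
          | cons a l => exact ⟨a, l, rfl⟩
        rw [pvRed_append]
        by_cases hcmp : pvDateKey (pvRed (h0 :: t0)) < pvDateKey path
        · rw [if_pos hcmp, if_pos hcmp]
        · rw [if_neg hcmp, if_neg hcmp]
          have hin : (pvDmap pvRed ib).insert table (pvRed (h0 :: t0)) = pvDmap pvRed ib := by
            apply pvInsert_noop
            · rw [pvDmap_keys]; exact (hg.2 _ hibm).1
            · rw [pvDmap_get?, hgs]; rfl
          rw [hin]
          have hin2 : (pvDmap (pvDmap pvRed) b).insert db (pvDmap pvRed ib) = pvDmap (pvDmap pvRed) b := by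
            apply pvInsert_noop
            · rw [pvDmap_keys]; exact hg.1
            · rw [pvDmap_get?, hib]; rfl
          rw [hin2]
      · -- table absent in the db's inner dict
        have hcond : (pvDmap pvRed ib).contains table = false := by
          rw [pvDmap_contains]; simpa using ht
        have hgetn : ib.getD table [] = [] :=
          PySem.Dict.getD_of_not_contains _ _ (by simpa using ht)
        have hmod : ib.modify table [] (fun gs => gs ++ [path]) = ib.insert table [path] := by
          unfold PySem.Dict.modify
          rw [hgetn]
          rfl
        rw [if_pos hcond, hmod, pvDmap_insert, pvDmap_insert]
        rfl
    · -- db absent: a fresh singleton inner dict appears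
      have hgetn : b.getD db PySem.Dict.empty = PySem.Dict.empty :=
        PySem.Dict.getD_of_not_contains _ _ (by simpa using hc)
      rw [hgetn]
      rw [show (PySem.Dict.empty : PySem.Dict String (List String)).modify table [] (fun gs => gs ++ [path]) =
          (PySem.Dict.empty : PySem.Dict String (List String)).insert table [path] from rfl]
      rw [pvDmap_insert, if_neg hc, PySem.Dict.getD_insert_self]
      simp only [PySem.Dict.contains_empty, if_true]
      rw [PySem.Dict.insert_insert_self, pvDmap_insert]
      rfl

lemma pvFold (l : List String) (b : PySem.Dict String (PySem.Dict String (List String)))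
    (hg : pvGood b) :
    l.foldl pvStepA (pvDmap (pvDmap pvRed) b) = pvDmap (pvDmap pvRed) (l.foldl pvStepB b) ∧
      pvGood (l.foldl pvStepB b) := by
  induction l generalizing b with
  | nil => exact ⟨rfl, hg⟩
  | cons p t ih =>
      simp only [List.foldl_cons]
      rw [pvStep_comm b p hg]
      exact ih (pvStepB b p) (pvStep_good b p hg)

lemma pvMax?_cons (h : String) (t : List String) :
    PySem.List.max? (h :: t) pvDateKey =
      some (t.foldl (fun b p => if pvDateKey b < pvDateKey p then p else b) h) := by
  show List.foldl _ (some h) t = _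
  induction t generalizing h with
  | nil => rfl
  | cons x xs ih =>
      simp only [List.foldl_cons]
      show List.foldl _ (if pvDateKey h < pvDateKey x then some x else some h) xs = _
      have hstep : (if pvDateKey h < pvDateKey x then some x else some h) =
          some (if pvDateKey h < pvDateKey x then x else h) := by
        by_cases hc : pvDateKey h < pvDateKey x
        · rw [if_pos hc, if_pos hc]
        · rw [if_neg hc, if_neg hc]
      rw [hstep]
      exact ih (if pvDateKey h < pvDateKey x then x else h)

lemma pvWinner_eq_red (gs : List String) (hne : gs ≠ []) : pvWinner gs = pvRed gs := by
  cases gs with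
  | nil => exact absurd rfl hne
  | cons h t =>
      cases t with
      | nil => rfl
      | cons x xs =>
          unfold pvWinner
          rw [pvMax?_cons]
          simp [pvRed]

-- ===== VERDICT (by name: the statement is the Claim_ definition above) =====
theorem cluster_by_database_and_table_spec : Claim_equal_cluster_by_database_and_table := by
  intro file_list _hdom _hpre
  unfold Spec_cluster_by_database_and_table
  unfold cluster_by_database_and_table cluster_by_database_and_table_alt
  have hemp : (PySem.Dict.empty : PySem.Dict String (PySem.Dict String String)) =
      pvDmap (pvDmap pvRed) (PySem.Dict.empty : PySem.Dict String (PySem.Dict String (List String))) := rfl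
  have hg0 : pvGood PySem.Dict.empty := ⟨List.nodup_nil, by intro kv hkv; cases hkv⟩
  obtain ⟨heq, hgood⟩ := pvFold file_list PySem.Dict.empty hg0
  rw [hemp, heq]
  simp only [pvDmap, List.map_map]
  apply List.map_congr_left
  intro kv hkv
  simp only [Function.comp]
  congr 1
  simp only [List.map_map]
  apply List.map_congr_left
  intro tv htv
  simp only [Function.comp]
  congr 1
  exact (congrArg (fun s => "blob://" ++ s) (pvWinner_eq_red tv.2 ((hgood.2 _ hkv).2 _ htv))).symm
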